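-- pv_equiv track=rewrite | github.com/NetRxn/SK_EFT_Hawking | src/core/formulas.py | fusion_associativity_check
-- ===== SOURCE A (Python) =====
-- def fusion_associativity_check(N, n_simples):
--     """Verify fusion associativity: Σ_m N^m_{ij} N^l_{mk} = Σ_m N^m_{jk} N^l_{im}.
--
--     This is the numerical version of the pentagon equation at the level
--     of fusion multiplicities (without phases).
--
--     Lean: fusion_associativity
--     Aristotle: manual
--     Source: Etingof et al., Tensor Categories, AMS (2015)
--
--     Args:
--         N: fusion rules tensor N[k][i][j]
--         n_simples: number of simple objects
--
--     Returns:
--         True if associativity holds for all i,j,k,l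
--     """
--     for i in range(n_simples):
--         for j in range(n_simples):
--             for k in range(n_simples):
--                 for l in range(n_simples):
--                     lhs = sum(N[m][i][j] * N[l][m][k] for m in range(n_simples))
--                     rhs = sum(N[m][j][k] * N[l][i][m] for m in range(n_simples))
--                     if lhs != rhs:
--                         return False
--     return True
-- ===== SOURCE B (Python) =====
-- def _matmul(P, Q, n):
--     cols = n * n
--     return [[sum(row[m] * Q[m][c] for m in range(n)) for c in range(cols)] for row in P]
--
--
-- def fusion_associativity_check(N, n_simples):
--     """Kronecker-flattened formulation: encode each index pair as one flat index,
--     build four n^2-by-n / n-by-n^2 matrices, take two generic matrix products,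
--     and compare the two resulting n^2-by-n^2 matrices after one index permutation."""
--     n = n_simples
--     if n <= 0:
--         return True
--     sq = n * n
--     rng = range(n)
--     X = [[N[m][r // n][r % n] for m in rng] for r in range(sq)]   # row (i,j), col m
--     Y = [[N[c // n][m][c % n] for c in range(sq)] for m in rng]   # row m, col (l,k)
--     Z = [[N[r % n][r // n][m] for m in rng] for r in range(sq)]   # row (i,l), col m
--     W = [[N[m][c // n][c % n] for c in range(sq)] for m in rng]   # row m, col (j,k)
--     L = _matmul(X, Y, n)   # L[i*n+j][l*n+k] = lhs(i,j,k,l)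
--     R = _matmul(Z, W, n)   # R[i*n+l][j*n+k] = rhs(i,j,k,l)
--     P = [[R[(r // n) * n + c // n][(r % n) * n + c % n] for c in range(sq)] for r in range(sq)]
--     return L == P
-- ===== Notes on version B (the rewrite author's own statement) =====
-- stated objective: alternative
-- what changed: A scans every quadruple (i,j,k,l) and recomputes both m-sums per quadruple; B flattens each index pair into one Kronecker index, builds four flat matrices, forms both contractions as two generic n^2-by-n times n-by-n^2 matrix products, and decides the check as a single equality of the two n^2-by-n^2 matrices after one index permutation.
-- outside the precondition, e.g. on fusion_associativity_check([[[2, 1], [2]], [[-1]]], 2): A returns False, B raises IndexError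
import Mathlib
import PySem

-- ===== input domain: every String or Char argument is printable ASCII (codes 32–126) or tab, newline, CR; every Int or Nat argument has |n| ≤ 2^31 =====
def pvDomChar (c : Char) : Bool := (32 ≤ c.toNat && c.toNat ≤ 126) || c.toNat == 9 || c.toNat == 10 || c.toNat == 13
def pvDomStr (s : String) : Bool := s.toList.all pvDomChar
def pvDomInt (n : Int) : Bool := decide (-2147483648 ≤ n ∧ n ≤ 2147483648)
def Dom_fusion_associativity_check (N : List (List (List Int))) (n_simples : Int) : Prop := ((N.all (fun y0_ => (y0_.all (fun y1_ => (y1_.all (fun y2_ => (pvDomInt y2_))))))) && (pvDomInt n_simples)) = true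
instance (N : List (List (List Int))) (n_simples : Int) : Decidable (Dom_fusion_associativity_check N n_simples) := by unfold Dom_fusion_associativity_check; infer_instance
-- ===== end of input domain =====

-- B replaces A's per-quadruple scan by a Kronecker-flattened pipeline: build four flat matrices,
-- take two generic matrix products, compare the two n²×n² results after one index permutation.

-- ===== PORT A =====
-- N[a][b][c]; the 0/[] defaults are only ever read outside Pre_ (Python raises there)
def pvG3 (N : List (List (List Int))) (a b c : Int) : Int :=
  PySem.List.pyGetD (PySem.List.pyGetD (PySem.List.pyGetD N a []) b []) c 0

def fusion_associativity_check (N : List (List (List Int))) (n_simples : Int) : Bool :=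
  (PySem.List.pyRange 0 n_simples 1).all fun i =>
    (PySem.List.pyRange 0 n_simples 1).all fun j =>
      (PySem.List.pyRange 0 n_simples 1).all fun k =>
        (PySem.List.pyRange 0 n_simples 1).all fun l =>
          ((PySem.List.pyRange 0 n_simples 1).map (fun m => pvG3 N m i j * pvG3 N l m k)).sum
            == ((PySem.List.pyRange 0 n_simples 1).map (fun m => pvG3 N m j k * pvG3 N l i m)).sum

-- ===== PORT B =====
-- _matmul(P, Q, n): generic n-contraction producing an (len P)×n² matrix
def pvMatmul (P Q : List (List Int)) (n : Int) : List (List Int) :=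
  P.map fun row =>
    (PySem.List.pyRange 0 (n * n) 1).map fun c =>
      ((PySem.List.pyRange 0 n 1).map fun m =>
        PySem.List.pyGetD row m 0 *
          PySem.List.pyGetD (PySem.List.pyGetD Q m []) c 0).sum

def fusion_associativity_check_alt (N : List (List (List Int))) (n_simples : Int) : Bool :=
  if n_simples ≤ 0 then true
  else
    let n := n_simples
    let sq := n * n
    let X := (PySem.List.pyRange 0 sq 1).map fun r =>
      (PySem.List.pyRange 0 n 1).map fun m =>
        pvG3 N m (PySem.Int.floordiv r n) (PySem.Int.mod r n)
    let Y := (PySem.List.pyRange 0 n 1).map fun m =>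
      (PySem.List.pyRange 0 sq 1).map fun c =>
        pvG3 N (PySem.Int.floordiv c n) m (PySem.Int.mod c n)
    let Z := (PySem.List.pyRange 0 sq 1).map fun r =>
      (PySem.List.pyRange 0 n 1).map fun m =>
        pvG3 N (PySem.Int.mod r n) (PySem.Int.floordiv r n) m
    let W := (PySem.List.pyRange 0 n 1).map fun m =>
      (PySem.List.pyRange 0 sq 1).map fun c =>
        pvG3 N m (PySem.Int.floordiv c n) (PySem.Int.mod c n)
    let L := pvMatmul X Y n
    let R := pvMatmul Z W n
    let P := (PySem.List.pyRange 0 sq 1).map fun r =>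
      (PySem.List.pyRange 0 sq 1).map fun c =>
        PySem.List.pyGetD
          (PySem.List.pyGetD R (PySem.Int.floordiv r n * n + PySem.Int.floordiv c n) [])
          (PySem.Int.mod r n * n + PySem.Int.mod c n) 0
    L == P

-- ===== PRECONDITION & SPEC =====
-- Pre_ requires the first n_simples×n_simples×n_simples block of N to be present; it also
-- excludes ragged tensors on which A happens to return False by short-circuit before reaching
-- a missing entry, an artefact of A's scan order (B builds the matrices first and raises there).
def Pre_fusion_associativity_check (N : List (List (List Int))) (n_simples : Int) : Prop :=
  n_simples ≤ (N.length : Int) ∧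
  ∀ p ∈ N.take n_simples.toNat, n_simples ≤ (p.length : Int) ∧
    ∀ q ∈ p.take n_simples.toNat, n_simples ≤ (q.length : Int)
instance (N : List (List (List Int))) (n_simples : Int) : Decidable (Pre_fusion_associativity_check N n_simples) := by unfold Pre_fusion_associativity_check; infer_instance

def pvWitness_fusion_associativity_check : List (List (List Int)) × Int := ([[[1]]], 1)

def Spec_fusion_associativity_check (N : List (List (List Int))) (n_simples : Int) (out : Bool) : Prop := out = fusion_associativity_check_alt N n_simples
instance (N : List (List (List Int))) (n_simples : Int) (out : Bool) : Decidable (Spec_fusion_associativity_check N n_simples out) := by unfold Spec_fusion_associativity_check; infer_instance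

-- ===== CLAIM (what is proved, stated in full; the proofs are below) =====
def Claim_equal_fusion_associativity_check : Prop := ∀ (N : List (List (List Int))) (n_simples : Int), Dom_fusion_associativity_check N n_simples → Pre_fusion_associativity_check N n_simples → Spec_fusion_associativity_check N n_simples (fusion_associativity_check N n_simples)

-- ===== LEMMAS AND PROOFS =====

-- Python // and % of the flat code a*n+b recover the two digits
theorem pv_divmod_encode (n a b : Int) (hn : 0 < n) (hb : 0 ≤ b) (hb' : b < n) :
    PySem.Int.floordiv (a * n + b) n = a ∧ PySem.Int.mod (a * n + b) n = b := by
  rw [PySem.Int.floordiv_eq_ediv_of_pos hn, PySem.Int.mod_eq_emod_of_pos hn]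
  have h1 : a * n + b = b + n * a := by ring
  constructor
  · rw [h1, Int.add_mul_ediv_left b a (by omega), Int.ediv_eq_zero_of_lt hb hb', zero_add]
  · rw [h1, Int.add_mul_emod_self_left, Int.emod_eq_of_lt hb hb']

-- digits of a flat index 0 ≤ r < n² lie in [0, n) and re-encode to r
theorem pv_divmod_bounds (n r : Int) (hn : 0 < n) (hr : 0 ≤ r) (hr' : r < n * n) :
    0 ≤ PySem.Int.floordiv r n ∧ PySem.Int.floordiv r n < n ∧
    0 ≤ PySem.Int.mod r n ∧ PySem.Int.mod r n < n ∧
    PySem.Int.floordiv r n * n + PySem.Int.mod r n = r := by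
  refine ⟨?_, ?_, PySem.Int.mod_nonneg r hn, PySem.Int.mod_lt r hn,
    PySem.Int.floordiv_mul_add_mod r n⟩
  · rw [PySem.Int.floordiv_eq_ediv_of_pos hn]; exact Int.ediv_nonneg hr (le_of_lt hn)
  · rw [PySem.Int.floordiv_eq_ediv_of_pos hn]
    exact (Int.ediv_lt_iff_lt_mul hn).mpr hr'

-- a flat code built from two digits in [0, n) lies in [0, n²)
theorem pv_code_bounds (n a b : Int) (ha : 0 ≤ a) (ha' : a < n) (hb : 0 ≤ b) (hb' : b < n) :
    0 ≤ a * n + b ∧ a * n + b < n * n := by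
  constructor
  · have : 0 ≤ a * n := mul_nonneg ha (by omega)
    omega
  · nlinarith

-- B (for n > 0) says: every (r, c) entry of L equals the permuted entry of R
theorem alt_iff_pairs (N : List (List (List Int))) (n : Int) (hn : 0 < n) :
    fusion_associativity_check_alt N n = true ↔
      ∀ r ∈ PySem.List.pyRange 0 (n * n) 1, ∀ c ∈ PySem.List.pyRange 0 (n * n) 1,
        ((PySem.List.pyRange 0 n 1).map fun m =>
            pvG3 N m (PySem.Int.floordiv r n) (PySem.Int.mod r n) *
            pvG3 N (PySem.Int.floordiv c n) m (PySem.Int.mod c n)).sum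
          = ((PySem.List.pyRange 0 n 1).map fun m =>
            pvG3 N (PySem.Int.floordiv c n) (PySem.Int.floordiv r n) m *
            pvG3 N m (PySem.Int.mod r n) (PySem.Int.mod c n)).sum := by
  unfold fusion_associativity_check_alt
  rw [if_neg (by omega)]
  simp only [pvMatmul, List.map_map, beq_iff_eq, List.map_inj_left, Function.comp_def]
  refine forall₂_congr fun r hr => ?_
  refine forall₂_congr fun c hc => ?_
  obtain ⟨hr0, hr1⟩ := PySem.List.mem_pyRange_one.mp hr
  obtain ⟨hc0, hc1⟩ := PySem.List.mem_pyRange_one.mp hc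
  obtain ⟨hrf0, hrf1, hrm0, hrm1, -⟩ := pv_divmod_bounds n r hn hr0 hr1
  obtain ⟨hcf0, hcf1, hcm0, hcm1, -⟩ := pv_divmod_bounds n c hn hc0 hc1
  -- left side: the (r, c) entry of L
  have hL : ((PySem.List.pyRange 0 n 1).map fun m =>
      PySem.List.pyGetD ((PySem.List.pyRange 0 n 1).map fun m =>
          pvG3 N m (PySem.Int.floordiv r n) (PySem.Int.mod r n)) m 0 *
      PySem.List.pyGetD (PySem.List.pyGetD ((PySem.List.pyRange 0 n 1).map fun m =>
          (PySem.List.pyRange 0 (n * n) 1).map fun c =>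
            pvG3 N (PySem.Int.floordiv c n) m (PySem.Int.mod c n)) m []) c 0).sum
      = ((PySem.List.pyRange 0 n 1).map fun m =>
          pvG3 N m (PySem.Int.floordiv r n) (PySem.Int.mod r n) *
          pvG3 N (PySem.Int.floordiv c n) m (PySem.Int.mod c n)).sum := by
    refine congrArg List.sum (List.map_congr_left fun m hm => ?_)
    obtain ⟨hm0, hm1⟩ := PySem.List.mem_pyRange_one.mp hm
    rw [PySem.List.pyGetD_map_pyRange_of_nonneg _ _ _ _ hm0 hm1,
        PySem.List.pyGetD_map_pyRange_of_nonneg _ _ _ _ hm0 hm1,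
        PySem.List.pyGetD_map_pyRange_of_nonneg _ _ _ _ hc0 hc1]
  -- right side: the permuted (r, c) lookup into R
  have ht := pv_code_bounds n _ _ hrf0 hrf1 hcf0 hcf1
  have hu := pv_code_bounds n _ _ hrm0 hrm1 hcm0 hcm1
  have het := pv_divmod_encode n (PySem.Int.floordiv r n) (PySem.Int.floordiv c n) hn hcf0 hcf1
  have heu := pv_divmod_encode n (PySem.Int.mod r n) (PySem.Int.mod c n) hn hcm0 hcm1
  have hR : PySem.List.pyGetD
      (PySem.List.pyGetD ((PySem.List.pyRange 0 (n * n) 1).map fun r =>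
        (PySem.List.pyRange 0 (n * n) 1).map fun c =>
          ((PySem.List.pyRange 0 n 1).map fun m =>
            PySem.List.pyGetD ((PySem.List.pyRange 0 n 1).map fun m =>
                pvG3 N (PySem.Int.mod r n) (PySem.Int.floordiv r n) m) m 0 *
            PySem.List.pyGetD (PySem.List.pyGetD ((PySem.List.pyRange 0 n 1).map fun m =>
                (PySem.List.pyRange 0 (n * n) 1).map fun c =>
                  pvG3 N m (PySem.Int.floordiv c n) (PySem.Int.mod c n)) m []) c 0).sum)
        (PySem.Int.floordiv r n * n + PySem.Int.floordiv c n) [])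
      (PySem.Int.mod r n * n + PySem.Int.mod c n) 0
      = ((PySem.List.pyRange 0 n 1).map fun m =>
          pvG3 N (PySem.Int.floordiv c n) (PySem.Int.floordiv r n) m *
          pvG3 N m (PySem.Int.mod r n) (PySem.Int.mod c n)).sum := by
    rw [PySem.List.pyGetD_map_pyRange_of_nonneg _ _ _ _ ht.1 ht.2,
        PySem.List.pyGetD_map_pyRange_of_nonneg _ _ _ _ hu.1 hu.2]
    refine congrArg List.sum (List.map_congr_left fun m hm => ?_)
    obtain ⟨hm0, hm1⟩ := PySem.List.mem_pyRange_one.mp hm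
    rw [PySem.List.pyGetD_map_pyRange_of_nonneg _ _ _ _ hm0 hm1,
        PySem.List.pyGetD_map_pyRange_of_nonneg _ _ _ _ hm0 hm1,
        PySem.List.pyGetD_map_pyRange_of_nonneg _ _ _ _ hu.1 hu.2,
        het.1, het.2, heu.1, heu.2]
  rw [hL, hR]

theorem ab_eq (N : List (List (List Int))) (n : Int) :
    fusion_associativity_check N n = fusion_associativity_check_alt N n := by
  by_cases hn : n ≤ 0
  · unfold fusion_associativity_check fusion_associativity_check_alt
    rw [if_pos hn, PySem.List.pyRange_one_eq_nil hn]
    rfl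
  · have hn : 0 < n := by omega
    rw [Bool.eq_iff_iff]
    unfold fusion_associativity_check
    rw [alt_iff_pairs N n hn]
    simp only [List.all_eq_true, beq_iff_eq]
    constructor
    · intro h r hr c hc
      obtain ⟨hr0, hr1⟩ := PySem.List.mem_pyRange_one.mp hr
      obtain ⟨hc0, hc1⟩ := PySem.List.mem_pyRange_one.mp hc
      obtain ⟨hrf0, hrf1, hrm0, hrm1, -⟩ := pv_divmod_bounds n r hn hr0 hr1
      obtain ⟨hcf0, hcf1, hcm0, hcm1, -⟩ := pv_divmod_bounds n c hn hc0 hc1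
      have := h (PySem.Int.floordiv r n) (PySem.List.mem_pyRange_one.mpr ⟨hrf0, hrf1⟩)
        (PySem.Int.mod r n) (PySem.List.mem_pyRange_one.mpr ⟨hrm0, hrm1⟩)
        (PySem.Int.mod c n) (PySem.List.mem_pyRange_one.mpr ⟨hcm0, hcm1⟩)
        (PySem.Int.floordiv c n) (PySem.List.mem_pyRange_one.mpr ⟨hcf0, hcf1⟩)
      rw [this]
      exact congrArg List.sum (List.map_congr_left fun m _ => mul_comm _ _)
    · intro h i hi j hj k hk l hl
      obtain ⟨hi0, hi1⟩ := PySem.List.mem_pyRange_one.mp hi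
      obtain ⟨hj0, hj1⟩ := PySem.List.mem_pyRange_one.mp hj
      obtain ⟨hk0, hk1⟩ := PySem.List.mem_pyRange_one.mp hk
      obtain ⟨hl0, hl1⟩ := PySem.List.mem_pyRange_one.mp hl
      have hr := pv_code_bounds n i j hi0 hi1 hj0 hj1
      have hc := pv_code_bounds n l k hl0 hl1 hk0 hk1
      have her := pv_divmod_encode n i j hn hj0 hj1
      have hec := pv_divmod_encode n l k hn hk0 hk1
      have := h (i * n + j) (PySem.List.mem_pyRange_one.mpr hr)
        (l * n + k) (PySem.List.mem_pyRange_one.mpr hc)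
      rw [her.1, her.2, hec.1, hec.2] at this
      rw [this]
      exact congrArg List.sum (List.map_congr_left fun m _ => mul_comm _ _)

-- ===== VERDICT (by name: the statement is the Claim_ definition above) =====
theorem fusion_associativity_check_spec : Claim_equal_fusion_associativity_check := by
  intro N n _ _
  unfold Spec_fusion_associativity_check
  exact ab_eq N n
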